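-- pv_equiv track=rewrite | github.com/sakshi5250/6Companies30Days | INTUIT/Question1.py | findMinimumRec
-- ===== SOURCE A (Python) =====
-- def findMinimumRec(arr, i, sumCalculated,
--                    sumTotal):
--
--     if (i == 0):
--         return abs((sumTotal - sumCalculated) -
--                    sumCalculated)
--
--     return min(findMinimumRec(arr, i - 1,
--                               sumCalculated+arr[i - 1],
--                               sumTotal),
--                findMinimumRec(arr, i - 1,
--                               sumCalculated, sumTotal))
-- ===== SOURCE B (Python) =====
-- def findMinimumRec(arr, i, sumCalculated, sumTotal):
--     # Iterative subset-sum: the set of sums reachable by adding any subset of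
--     # arr[:i] to sumCalculated, then the minimum partition difference.
--     sums = {sumCalculated}
--     for k in range(i):
--         a = arr[k]
--         sums |= {s + a for s in sums}
--     return min(abs(sumTotal - 2 * s) for s in sums)
-- ===== Notes on version B (the rewrite author's own statement) =====
-- stated objective: faster
-- what changed: Replaces the exponential branch recursion (two recursive calls per element) with an iterative subset-sum pass that maintains the set of distinct achievable sums and then minimizes |sumTotal - 2*s| over it.
import Mathlib
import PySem

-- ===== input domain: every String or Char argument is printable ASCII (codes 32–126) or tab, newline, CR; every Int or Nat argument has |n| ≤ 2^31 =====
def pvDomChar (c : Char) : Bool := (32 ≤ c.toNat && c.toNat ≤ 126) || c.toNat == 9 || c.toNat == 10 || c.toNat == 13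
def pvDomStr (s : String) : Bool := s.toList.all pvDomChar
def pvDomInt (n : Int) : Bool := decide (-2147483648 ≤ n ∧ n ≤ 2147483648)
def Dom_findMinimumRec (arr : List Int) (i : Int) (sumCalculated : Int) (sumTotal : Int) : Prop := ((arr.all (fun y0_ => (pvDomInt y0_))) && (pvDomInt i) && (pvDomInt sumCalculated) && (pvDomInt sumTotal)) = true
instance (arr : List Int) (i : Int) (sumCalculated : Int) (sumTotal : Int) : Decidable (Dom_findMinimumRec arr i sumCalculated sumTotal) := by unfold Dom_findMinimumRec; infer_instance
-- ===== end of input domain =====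

-- B replaces A's exponential two-way branch recursion by one iterative subset-sum pass
-- over the set of distinct achievable sums (objective: faster).

-- ===== PORT A =====
-- Literal port of A's recursion. For i < 0 Python never reaches the base case and
-- eventually raises (RecursionError/IndexError); for i > len(arr) it raises IndexError
-- (pyGet? = none). Both are outside Pre_; the port returns 0 there.
def findMinimumRec (arr : List Int) (i : Int) (sumCalculated : Int) (sumTotal : Int) : Int :=
  if _h : i = 0 then |(sumTotal - sumCalculated) - sumCalculated|
  else if _h2 : i < 0 then 0
  else
    match PySem.List.pyGet? arr (i - 1) with
    | none => 0
    | some a =>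
        min (findMinimumRec arr (i - 1) (sumCalculated + a) sumTotal)
            (findMinimumRec arr (i - 1) sumCalculated sumTotal)
termination_by i.toNat
decreasing_by all_goals (simp_wf; omega)

-- ===== PORT B =====
-- Literal port of Source B: build the set of achievable sums with a fold over range(i),
-- then take the min of |sumTotal - 2*s| over the set (order-insensitive consumption).
-- arr[k] is pyGetD (exact under Pre_, which puts k = 0..i-1 in range).
def findMinimumRec_alt (arr : List Int) (i : Int) (sumCalculated : Int) (sumTotal : Int) : Int :=
  let sums : PySem.Set Int :=
    (PySem.List.pyRange 0 i 1).foldl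
      (fun sums k => PySem.Set.union sums (sums.map (fun s => s + PySem.List.pyGetD arr k 0)))
      (PySem.Set.ofList [sumCalculated])
  (PySem.List.min? (sums.map (fun s => |sumTotal - 2 * s|)) (fun x => x)).getD 0

-- ===== PRECONDITION & SPEC =====
-- Pre_ excludes exactly the inputs where Python A raises: i > len(arr) is an immediate
-- or eventual IndexError, i < 0 never reaches the base case (RecursionError/IndexError).
def Pre_findMinimumRec (arr : List Int) (i : Int) (sumCalculated : Int) (sumTotal : Int) : Prop :=
  0 ≤ i ∧ i ≤ arr.length
instance (arr : List Int) (i : Int) (sumCalculated : Int) (sumTotal : Int) : Decidable (Pre_findMinimumRec arr i sumCalculated sumTotal) := by unfold Pre_findMinimumRec; infer_instance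

def pvWitness_findMinimumRec : List Int × Int × Int × Int := ([3, 1, 4, 2], 4, 0, 10)

def Spec_findMinimumRec (arr : List Int) (i : Int) (sumCalculated : Int) (sumTotal : Int) (out : Int) : Prop := out = findMinimumRec_alt arr i sumCalculated sumTotal
instance (arr : List Int) (i : Int) (sumCalculated : Int) (sumTotal : Int) (out : Int) : Decidable (Spec_findMinimumRec arr i sumCalculated sumTotal out) := by unfold Spec_findMinimumRec; infer_instance

-- ===== CLAIM (what is proved, stated in full; the proofs are below) =====
def Claim_equal_findMinimumRec : Prop := ∀ (arr : List Int) (i : Int) (sumCalculated : Int) (sumTotal : Int), Dom_findMinimumRec arr i sumCalculated sumTotal → Pre_findMinimumRec arr i sumCalculated sumTotal → Spec_findMinimumRec arr i sumCalculated sumTotal (findMinimumRec arr i sumCalculated sumTotal)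

-- ===== LEMMAS AND PROOFS =====

-- Multiset of sums sc + (subset sum of l), as A's recursion tree enumerates them.
def pvS (sc : Int) : List Int → List Int
  | [] => [sc]
  | a :: l => pvS (sc + a) l ++ pvS sc l

lemma pvS_ne_nil (sc : Int) (l : List Int) : pvS sc l ≠ [] := by
  induction l generalizing sc with
  | nil => simp [pvS]
  | cons a l ih => simp [pvS, ih]

lemma pvS_shift (l : List Int) : ∀ (sc a : Int), pvS (sc + a) l = (pvS sc l).map (· + a) := by
  induction l with
  | nil => intro sc a; simp [pvS]
  | cons b l ih =>
      intro sc a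
      simp only [pvS, List.map_append]
      rw [add_right_comm sc a b, ih (sc + b) a, ih sc a]

lemma mem_pvS_append_singleton (l : List Int) : ∀ (sc a x : Int),
    x ∈ pvS sc (l ++ [a]) ↔ x ∈ pvS (sc + a) l ∨ x ∈ pvS sc l := by
  induction l with
  | nil => intro sc a x; simp [pvS]
  | cons b l ih =>
      intro sc a x
      simp only [List.cons_append, pvS, List.mem_append, ih]
      rw [add_right_comm sc b a]
      tauto

-- min(...) of a nonempty Int list, as B's final generator-min computes it.
def pvMn (L : List Int) : Int := (PySem.List.min? L (fun x => x)).getD 0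

lemma pvMn_spec (L : List Int) (h : L ≠ []) : pvMn L ∈ L ∧ ∀ x ∈ L, pvMn L ≤ x := by
  cases hm : PySem.List.min? L (fun x => x) with
  | none => exact absurd ((PySem.List.min?_eq_none_iff L _).mp hm) h
  | some m =>
      have hmem := PySem.List.min?_mem hm
      have hmin := PySem.List.min?_isMin hm
      simp only [pvMn, hm, Option.getD_some]
      exact ⟨hmem, hmin⟩

lemma pvMn_congr (L1 L2 : List Int) (h1 : L1 ≠ []) (h2 : L2 ≠ [])
    (h : ∀ x, x ∈ L1 ↔ x ∈ L2) : pvMn L1 = pvMn L2 := by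
  obtain ⟨m1, lo1⟩ := pvMn_spec L1 h1
  obtain ⟨m2, lo2⟩ := pvMn_spec L2 h2
  exact le_antisymm (lo1 _ ((h _).mpr m2)) (lo2 _ ((h _).mp m1))

lemma pvMn_append (L1 L2 : List Int) (h1 : L1 ≠ []) (h2 : L2 ≠ []) :
    pvMn (L1 ++ L2) = min (pvMn L1) (pvMn L2) := by
  have h12 : L1 ++ L2 ≠ [] := by simp [h1]
  obtain ⟨m12, lo12⟩ := pvMn_spec _ h12
  obtain ⟨m1, lo1⟩ := pvMn_spec L1 h1
  obtain ⟨m2, lo2⟩ := pvMn_spec L2 h2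
  apply le_antisymm
  · exact le_min (lo12 _ (List.mem_append_left _ m1)) (lo12 _ (List.mem_append_right _ m2))
  · rcases List.mem_append.mp m12 with hm | hm
    · exact le_trans (min_le_left _ _) (lo1 _ hm)
    · exact le_trans (min_le_right _ _) (lo2 _ hm)

-- A computes the minimum of |st - 2*s| over the multiset of achievable sums.
lemma A_char (arr : List Int) (st : Int) :
    ∀ (n : Nat) (sc : Int), n ≤ arr.length →
      findMinimumRec arr (n : Int) sc st
        = pvMn ((pvS sc (arr.take n)).map (fun s => |st - 2 * s|)) := by
  intro n
  induction n with
  | zero =>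
      intro sc _
      rw [findMinimumRec]
      simp only [Nat.cast_zero, List.take_zero, pvS, List.map_cons, List.map_nil]
      have : (st - sc) - sc = st - 2 * sc := by ring
      rw [this, pvMn, PySem.List.min?_id_cons]
      simp
  | succ n ih =>
      intro sc hlen
      have hn : n < arr.length := by omega
      rw [findMinimumRec]
      have h0 : ¬ ((n : Int) + 1 = 0) := by omega
      have h1 : ¬ ((n : Int) + 1 < 0) := by omega
      have hidx : ((n : Int) + 1 - 1) = (n : Int) := by ring
      simp only [Nat.cast_add, Nat.cast_one, dif_neg h0, dif_neg h1, hidx,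
        PySem.List.pyGet?_natCast, List.getElem?_eq_getElem hn]
      rw [ih (sc + arr[n]) (by omega), ih sc (by omega)]
      have htake : arr.take (n + 1) = arr.take n ++ [arr[n]] := by
        rw [List.take_add_one, List.getElem?_eq_getElem hn]; rfl
      rw [htake]
      rw [pvMn_congr ((pvS sc (arr.take n ++ [arr[n]])).map (fun s => |st - 2 * s|))
            ((pvS (sc + arr[n]) (arr.take n) ++ pvS sc (arr.take n)).map (fun s => |st - 2 * s|))
            (by simp [pvS_ne_nil]) (by simp [pvS_ne_nil])
            (by intro x
                simp only [List.mem_map, List.mem_append, mem_pvS_append_singleton]),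
          List.map_append,
          pvMn_append _ _ (by simp [pvS_ne_nil]) (by simp [pvS_ne_nil])]

-- The fold in B reaches exactly the sums of pvS (as a set).
lemma B_mem (arr : List Int) (sc : Int) :
    ∀ (n : Nat), n ≤ arr.length → ∀ x,
      (x ∈ (PySem.List.pyRange 0 (n : Int) 1).foldl
        (fun sums k => PySem.Set.union sums (sums.map (fun s => s + PySem.List.pyGetD arr k 0)))
        (PySem.Set.ofList [sc]))
      ↔ x ∈ pvS sc (arr.take n) := by
  intro n
  induction n with
  | zero =>
      intro _ x
      simp [PySem.List.pyRange, PySem.Set.ofList, PySem.Set.add, pvS, PySem.Set.contains,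
        PySem.Set.empty]
  | succ n ih =>
      intro hlen x
      have hn : n < arr.length := by omega
      have hrange : PySem.List.pyRange 0 ((n : Int) + 1) 1
          = PySem.List.pyRange 0 (n : Int) 1 ++ [(n : Int)] := by
        rw [PySem.List.pyRange_one_succ_right] <;> omega
      have htake : arr.take (n + 1) = arr.take n ++ [arr[n]] := by
        rw [List.take_add_one, List.getElem?_eq_getElem hn]; rfl
      push_cast
      rw [hrange, List.foldl_append, htake]
      simp only [List.foldl_cons, List.foldl_nil, PySem.Set.mem_union, List.mem_map,
        mem_pvS_append_singleton, pvS_shift, PySem.List.pyGetD_natCast,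
        List.getD_eq_getElem _ _ hn]
      constructor
      · rintro (h | ⟨y, hy, rfl⟩)
        · right; exact (ih (by omega) x).mp h
        · left; exact ⟨y, (ih (by omega) y).mp hy, rfl⟩
      · rintro (⟨y, hy, rfl⟩ | h)
        · exact Or.inr ⟨y, (ih (by omega) y).mpr hy, rfl⟩
        · exact Or.inl ((ih (by omega) x).mpr h)

-- ===== VERDICT (by name: the statement is the Claim_ definition above) =====
theorem findMinimumRec_spec : Claim_equal_findMinimumRec := by
  intro arr i sc st _hdom hpre
  obtain ⟨h0, hlen⟩ := hpre
  obtain ⟨n, rfl⟩ : ∃ n : Nat, i = (n : Int) := ⟨i.toNat, (Int.toNat_of_nonneg h0).symm⟩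
  have hn : n ≤ arr.length := by exact_mod_cast hlen
  unfold Spec_findMinimumRec findMinimumRec_alt
  rw [A_char arr st n sc hn]
  exact pvMn_congr _ _
    (by simp [pvS_ne_nil])
    (by
      have hne := pvS_ne_nil sc (arr.take n)
      rcases List.exists_mem_of_ne_nil _ hne with ⟨y, hy⟩
      intro hnil
      have hy2 := (B_mem arr sc n hn y).mpr hy
      rw [List.map_eq_nil_iff.mp hnil] at hy2
      exact absurd hy2 (List.not_mem_nil))
    (by
      intro x
      constructor
      · rintro hx
        rcases List.mem_map.mp hx with ⟨y, hy, rfl⟩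
        exact List.mem_map.mpr ⟨y, (B_mem arr sc n hn y).mpr hy, rfl⟩
      · rintro hx
        rcases List.mem_map.mp hx with ⟨y, hy, rfl⟩
        exact List.mem_map.mpr ⟨y, (B_mem arr sc n hn y).mp hy, rfl⟩)
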